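-- pv_equiv track=rewrite | github.com/danaing/Coding-test | 20200922-first_cote.py | solution
-- ===== SOURCE A (Python) =====
-- def solution (A, K) :
--     # 먼저 내림차순 정렬
--     A_sort = sorted(A, reverse=True)
--     odds = [x for x in A_sort[:K] if x%2==1]
--     even = [x for x in A_sort[K:] if x%2==0]
--     # K가 A의 개수보다 많으면 불가능
--     if K > len(A) :
--         return(-1)
--         # K개의 합이 짝수인가?
--     elif sum(A_sort[0:K])%2 == 0 :
--         summ = sum(A_sort[0:K])
--         return(summ)
--         # 합이 짝수가 아니면 홀수 중 가장 작은걸 빼고, 나머지 중 가장 큰 짝수를 더한다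
--     elif len(even) > 0 :
--         summ = sum(A_sort[0:K]) - min(odds) + max(even)
--         return(summ)
--     else:
--         return(-1)
-- ===== SOURCE B (Python) =====
-- def solution(A, K):
--     # Parity-split algorithm: instead of sorting the whole list and slicing it,
--     # sort evens and odds separately (descending) and merge-count the K largest.
--     if K > len(A):
--         return -1
--     evens = sorted((x for x in A if x % 2 == 0), reverse=True)
--     odds = sorted((x for x in A if x % 2 == 1), reverse=True)
--     s = 0
--     e = o = 0
--     for _ in range(K):
--         if o == len(odds) or (e < len(evens) and evens[e] > odds[o]):
--             s += evens[e]
--             e += 1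
--         else:
--             s += odds[o]
--             o += 1
--     if s % 2 == 0:
--         return s
--     if e < len(evens):
--         return s - odds[o - 1] + evens[e]
--     return -1
-- ===== Notes on version B (the rewrite author's own statement) =====
-- stated objective: alternative
-- what changed: A sorts the whole list descending and works with slices/comprehensions of that one sorted list; B never sorts the full list: it partitions by parity, sorts evens and odds separately, merge-counts the K largest across the two lists, and reads the minimum taken odd and maximum untaken even directly off the two sorted lists by index.
-- outside the precondition, e.g. on solution([2, 4], -1): A returns 4, B returns 0
import Mathlib
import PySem

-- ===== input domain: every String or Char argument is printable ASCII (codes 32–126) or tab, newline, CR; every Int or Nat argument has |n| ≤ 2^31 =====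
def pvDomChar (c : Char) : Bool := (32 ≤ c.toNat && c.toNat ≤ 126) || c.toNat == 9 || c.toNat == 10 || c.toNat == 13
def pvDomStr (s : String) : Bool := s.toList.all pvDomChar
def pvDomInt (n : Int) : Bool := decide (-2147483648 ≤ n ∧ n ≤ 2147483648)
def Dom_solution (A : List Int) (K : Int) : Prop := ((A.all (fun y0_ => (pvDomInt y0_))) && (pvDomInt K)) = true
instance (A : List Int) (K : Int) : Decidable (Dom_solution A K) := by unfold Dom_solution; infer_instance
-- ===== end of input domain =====

-- B replaces A's sort-the-whole-list-and-slice scheme by a parity split: evens and odds are sorted separately and the K largest are merge-counted across the two lists (alternative decomposition, same asymptotics).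


-- ===== PORT A =====
def solution (A : List Int) (K : Int) : Int :=
  let A_sort := PySem.List.sorted A (fun x => x) true
  let odds := (PySem.List.slice A_sort none (some K)).filter (fun x => PySem.Int.mod x 2 == 1)
  let even := (PySem.List.slice A_sort (some K) none).filter (fun x => PySem.Int.mod x 2 == 0)
  if K > (A.length : Int) then -1
  else if PySem.Int.mod (PySem.List.slice A_sort (some 0) (some K)).sum 2 == 0 then
    (PySem.List.slice A_sort (some 0) (some K)).sum
  else if even.length > 0 then
    match PySem.List.min? odds (fun x => x), PySem.List.max? even (fun x => x) with
    | some mn, some mx => (PySem.List.slice A_sort (some 0) (some K)).sum - mn + mx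
    | _, _ => 0  -- Python's min([]) would raise here; unreachable when 0 ≤ K (odd top-K sum forces an odd element)
  else -1

-- ===== PORT B =====
-- the for-loop of Source B: fuel = remaining iterations, state = (s, e, o)
def solAltMerge (evens odds : List Int) : Nat → Int × Nat × Nat → Int × Nat × Nat
  | 0, st => st
  | n+1, (s, e, o) =>
    if o == odds.length || (decide (e < evens.length) && decide (odds.getD o 0 < evens.getD e 0)) then
      solAltMerge evens odds n (s + evens.getD e 0, e + 1, o)
    else
      solAltMerge evens odds n (s + odds.getD o 0, e, o + 1)

def solution_alt (A : List Int) (K : Int) : Int :=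
  if K > (A.length : Int) then -1
  else
    let evens := PySem.List.sorted (A.filter (fun x => PySem.Int.mod x 2 == 0)) (fun x => x) true
    let odds := PySem.List.sorted (A.filter (fun x => PySem.Int.mod x 2 == 1)) (fun x => x) true
    let r := solAltMerge evens odds K.toNat (0, 0, 0)
    if PySem.Int.mod r.1 2 == 0 then r.1
    else if r.2.1 < evens.length then r.1 - odds.getD (r.2.2 - 1) 0 + evens.getD r.2.1 0
    else -1

-- ===== PRECONDITION & SPEC =====
-- Pre_ excludes negative K, which is outside the task's natural domain ("K largest elements"):
-- there A's value is an artefact of Python's negative-slice semantics and B naturally sums nothing.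
def Pre_solution (A : List Int) (K : Int) : Prop := 0 ≤ K
instance (A : List Int) (K : Int) : Decidable (Pre_solution A K) := by unfold Pre_solution; infer_instance
def pvWitness_solution : List Int × Int := ([5, 4, 3, 2, 1], 3)
def Spec_solution (A : List Int) (K : Int) (out : Int) : Prop := out = solution_alt A K
instance (A : List Int) (K : Int) (out : Int) : Decidable (Spec_solution A K out) := by unfold Spec_solution; infer_instance

-- ===== CLAIM (what is proved, stated in full; the proofs are below) =====
def Claim_equal_solution : Prop := ∀ (A : List Int) (K : Int), Dom_solution A K → Pre_solution A K → Spec_solution A K (solution A K)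

-- ===== LEMMAS AND PROOFS =====

-- the descending merge underlying B's merge-count loop
def pmerge : List Int → List Int → List Int
  | [], od => od
  | ev, [] => ev
  | a :: ev, b :: od => if b < a then a :: pmerge ev (b :: od) else b :: pmerge (a :: ev) od
termination_by ev od => ev.length + od.length

theorem pmerge_perm : ∀ (ev od : List Int), (pmerge ev od).Perm (ev ++ od) := by
  intro ev od
  induction ev, od using pmerge.induct with
  | case1 od => simp [pmerge]
  | case2 ev h => simp [pmerge]
  | case3 a ev b od hlt ih => simpa [pmerge, hlt] using ih.cons a
  | case4 a ev b od hlt ih =>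
    simp only [pmerge, if_neg hlt]
    exact (ih.cons b).trans (List.perm_middle (a := b) (l₁ := a :: ev) (l₂ := od)).symm

theorem pmerge_nil_right (ev : List Int) : pmerge ev [] = ev := by
  cases ev <;> simp [pmerge]

theorem pmerge_pairwise : ∀ (ev od : List Int),
    ev.Pairwise (fun a b => b ≤ a) → od.Pairwise (fun a b => b ≤ a) →
    (pmerge ev od).Pairwise (fun a b => b ≤ a) := by
  intro ev od
  induction ev, od using pmerge.induct with
  | case1 od => intro _ hod; simpa [pmerge] using hod
  | case2 ev h => intro hev _; simpa [pmerge] using hev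
  | case3 a ev b od hlt ih =>
    intro hev hod
    rw [List.pairwise_cons] at hev
    simp only [pmerge, if_pos hlt]
    rw [List.pairwise_cons]
    refine ⟨?_, ih hev.2 hod⟩
    intro y hy
    have hy' := (pmerge_perm ev (b :: od)).mem_iff.mp hy
    rw [List.pairwise_cons] at hod
    rcases List.mem_append.mp hy' with h1 | h1
    · exact hev.1 y h1
    · rcases List.mem_cons.mp h1 with rfl | h2
      · omega
      · have := hod.1 y h2; omega
  | case4 a ev b od hlt ih =>
    intro hev hod
    rw [List.pairwise_cons] at hod
    simp only [pmerge, if_neg hlt]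
    rw [List.pairwise_cons]
    refine ⟨?_, ih hev hod.2⟩
    intro y hy
    have hy' := (pmerge_perm (a :: ev) od).mem_iff.mp hy
    rw [List.pairwise_cons] at hev
    rcases List.mem_append.mp hy' with h1 | h1
    · rcases List.mem_cons.mp h1 with rfl | h2
      · omega
      · have := hev.1 y h2; omega
    · exact hod.1 y h1

theorem pmerge_filter_left (p : Int → Bool) : ∀ (ev od : List Int),
    (∀ x ∈ ev, p x = true) → (∀ x ∈ od, p x = false) →
    (pmerge ev od).filter p = ev := by
  intro ev od
  induction ev, od using pmerge.induct with
  | case1 od =>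
    intro _ hod
    simp only [pmerge]
    exact List.filter_eq_nil_iff.mpr (fun x hx => by simp [hod x hx])
  | case2 ev h =>
    intro hev _
    simp only [pmerge]
    exact List.filter_eq_self.mpr hev
  | case3 a ev b od hlt ih =>
    intro hev hod
    simp only [pmerge, if_pos hlt, List.filter_cons, hev a (by simp)]
    exact congrArg (a :: ·) (ih (fun x hx => hev x (by simp [hx])) hod)
  | case4 a ev b od hlt ih =>
    intro hev hod
    simp only [pmerge, if_neg hlt, List.filter_cons, hod b (by simp)]
    simp only [Bool.false_eq_true, if_false]
    exact ih hev (fun x hx => hod x (by simp [hx]))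

-- the list-consuming shape of the merge-count loop (proof device)
def mtake : Nat → List Int → List Int → Int × Nat × Nat
  | 0, _, _ => (0, 0, 0)
  | _+1, [], [] => (0, 0, 0)
  | n+1, a :: ev, [] =>
    let r := mtake n ev []
    (a + r.1, r.2.1 + 1, r.2.2)
  | n+1, [], b :: od =>
    let r := mtake n [] od
    (b + r.1, r.2.1, r.2.2 + 1)
  | n+1, a :: ev, b :: od =>
    if b < a then
      let r := mtake n ev (b :: od)
      (a + r.1, r.2.1 + 1, r.2.2)
    else
      let r := mtake n (a :: ev) od
      (b + r.1, r.2.1, r.2.2 + 1)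

theorem mtake_spec (p : Int → Bool) : ∀ (n : Nat) (ev od : List Int),
    (∀ x ∈ ev, p x = true) → (∀ x ∈ od, p x = false) →
    (mtake n ev od).1 = ((pmerge ev od).take n).sum ∧
    (mtake n ev od).2.1 ≤ ev.length ∧ (mtake n ev od).2.2 ≤ od.length ∧
    ((pmerge ev od).take n).filter p = ev.take (mtake n ev od).2.1 ∧
    ((pmerge ev od).take n).filter (fun x => !(p x)) = od.take (mtake n ev od).2.2 := by
  intro n ev od
  induction n, ev, od using mtake.induct with
  | case1 ev od => intro _ _; simp [mtake]
  | case2 n => intro _ _; simp [mtake, pmerge]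
  | case3 n a ev ih =>
    intro hev hod
    obtain ⟨ih1, ih2, ih3, ih4, ih5⟩ := ih (fun x hx => hev x (by simp [hx])) (by simp)
    rw [pmerge_nil_right] at ih1 ih4 ih5
    simp only [mtake, pmerge_nil_right, List.take_succ_cons, List.sum_cons, List.filter_cons,
      hev a (by simp)]
    exact ⟨by simp [ih1], by simpa using ih2, by simpa using ih3, by simp [ih4], by simp [ih5]⟩
  | case4 n b od ih =>
    intro hev hod
    obtain ⟨ih1, ih2, ih3, ih4, ih5⟩ := ih (by simp) (fun x hx => hod x (by simp [hx]))
    simp only [pmerge] at ih1 ih4 ih5 ⊢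
    simp only [mtake, List.take_succ_cons, List.sum_cons, List.filter_cons, hod b (by simp)]
    exact ⟨by simp [ih1], by simpa using ih2, by simpa using ih3, by simp [ih4], by simp [ih5]⟩
  | case5 n a ev b od hlt ih =>
    intro hev hod
    obtain ⟨ih1, ih2, ih3, ih4, ih5⟩ := ih (fun x hx => hev x (by simp [hx])) hod
    simp only [mtake, pmerge, if_pos hlt, List.take_succ_cons, List.sum_cons, List.filter_cons,
      hev a (by simp)]
    exact ⟨by simp [ih1], by simpa using ih2, by simpa using ih3, by simp [ih4], by simp [ih5]⟩
  | case6 n a ev b od hlt ih =>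
    intro hev hod
    obtain ⟨ih1, ih2, ih3, ih4, ih5⟩ := ih hev (fun x hx => hod x (by simp [hx]))
    simp only [mtake, pmerge, if_neg hlt, List.take_succ_cons, List.sum_cons, List.filter_cons,
      hod b (by simp)]
    exact ⟨by simp [ih1], by simpa using ih2, by simpa using ih3, by simp [ih4], by simp [ih5]⟩

-- B's indexed loop is the list-consuming merge-count
theorem solAltMerge_eq_mtake : ∀ (n : Nat) (ev od : List Int) (s : Int) (e o : Nat),
    e ≤ ev.length → o ≤ od.length → n ≤ (ev.length - e) + (od.length - o) →
    solAltMerge ev od n (s, e, o) =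
      (s + (mtake n (ev.drop e) (od.drop o)).1,
       e + (mtake n (ev.drop e) (od.drop o)).2.1,
       o + (mtake n (ev.drop e) (od.drop o)).2.2) := by
  intro n ev od
  induction n with
  | zero => intro s e o _ _ _; simp [solAltMerge, mtake]
  | succ n ih =>
    intro s e o he ho hn
    by_cases hoe : o = od.length
    · subst hoe
      have he' : e < ev.length := by omega
      have hc : (od.length == od.length || (decide (e < ev.length) && decide (od.getD od.length 0 < ev.getD e 0))) = true := by simp
      have hdev : ev.drop e = ev.getD e 0 :: ev.drop (e + 1) := by
        rw [List.drop_eq_getElem_cons he', List.getD_eq_getElem _ _ he']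
      simp only [solAltMerge, hc, if_true]
      rw [ih (s + ev.getD e 0) (e + 1) od.length he' (le_refl _) (by omega)]
      rw [hdev, List.drop_length]
      simp only [mtake, Prod.mk.injEq]
      refine ⟨by ring, ?_, ?_⟩ <;> first | trivial | omega
    · have ho' : o < od.length := by omega
      have hdod : od.drop o = od.getD o 0 :: od.drop (o + 1) := by
        rw [List.drop_eq_getElem_cons ho', List.getD_eq_getElem _ _ ho']
      by_cases he' : e < ev.length
      · have hdev : ev.drop e = ev.getD e 0 :: ev.drop (e + 1) := by
          rw [List.drop_eq_getElem_cons he', List.getD_eq_getElem _ _ he']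
        by_cases hba : od.getD o 0 < ev.getD e 0
        · have hc : (o == od.length || (decide (e < ev.length) && decide (od.getD o 0 < ev.getD e 0))) = true := by
            have h2 : decide (od.getD o 0 < ev.getD e 0) = true := by simpa using hba
            have h3 : decide (e < ev.length) = true := by simpa using he'
            simp only [h2, h3, Bool.and_true, Bool.or_true]
          simp only [solAltMerge, hc, if_true]
          rw [ih (s + ev.getD e 0) (e + 1) o he' (le_of_lt ho') (by omega)]
          rw [hdev, hdod]
          simp only [mtake, if_pos hba, Prod.mk.injEq]
          rw [← hdod]
          refine ⟨by ring, ?_, ?_⟩ <;> first | trivial | omega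
        · have hc : (o == od.length || (decide (e < ev.length) && decide (od.getD o 0 < ev.getD e 0))) = false := by
            have h1 : (o == od.length) = false := by simp [hoe]
            have h2 : decide (od.getD o 0 < ev.getD e 0) = false := by simpa using hba
            simp only [h1, h2, Bool.and_false, Bool.or_false]
          simp only [solAltMerge, hc, Bool.false_eq_true, if_false]
          rw [ih (s + od.getD o 0) e (o + 1) (le_of_lt he') ho' (by omega)]
          rw [hdev, hdod]
          simp only [mtake, if_neg hba, Prod.mk.injEq]
          rw [← hdev]
          refine ⟨by ring, ?_, ?_⟩ <;> first | trivial | omega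
      · have hdev : ev.drop e = [] := List.drop_of_length_le (by omega)
        have hc : (o == od.length || (decide (e < ev.length) && decide (od.getD o 0 < ev.getD e 0))) = false := by
          simp [hoe, he']
        simp only [solAltMerge, hc, Bool.false_eq_true, if_false]
        rw [ih (s + od.getD o 0) e (o + 1) (by omega) ho' (by omega)]
        rw [hdev, hdod]
        simp only [mtake, Prod.mk.injEq]
        rw [← hdev]
        refine ⟨by ring, ?_, ?_⟩ <;> first | trivial | omega

-- every int is even or odd in Python's sense
theorem mod2_odd_eq_not_even (x : Int) :
    (PySem.Int.mod x 2 == 1) = !(PySem.Int.mod x 2 == 0) := by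
  rcases PySem.Int.mod_two_eq x with h | h <;> rw [h] <;> rfl

-- a list with no odd element has even sum
theorem sum_even_of_no_odd (l : List Int) (h : ∀ x ∈ l, ¬ (PySem.Int.mod x 2 == 1)) :
    PySem.Int.mod l.sum 2 = 0 := by
  induction l with
  | nil => decide
  | cons x t ih =>
    have hx := h x (by simp)
    have ht := ih (fun y hy => h y (by simp [hy]))
    have e1 : PySem.Int.mod x 2 = x % 2 := PySem.Int.mod_eq_emod_of_pos (by omega)
    have e2 : PySem.Int.mod t.sum 2 = t.sum % 2 := PySem.Int.mod_eq_emod_of_pos (by omega)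
    have e3 : PySem.Int.mod (x + t.sum) 2 = (x + t.sum) % 2 := PySem.Int.mod_eq_emod_of_pos (by omega)
    simp only [beq_iff_eq, e1] at hx
    rw [e2] at ht
    simp only [List.sum_cons, e3]
    omega

-- min of a nonempty descending prefix is its last element
theorem min_take_desc (od : List Int) (o : Nat) (h1 : 1 ≤ o) (h2 : o ≤ od.length)
    (hp : od.Pairwise (fun a b => b ≤ a)) :
    PySem.List.min? (od.take o) (fun x => x) = some (od.getD (o - 1) 0) := by
  obtain ⟨b, od₁, rfl⟩ : ∃ b od₁, od = b :: od₁ := by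
    cases od with
    | nil => simp at h2; omega
    | cons b od₁ => exact ⟨b, od₁, rfl⟩
  obtain ⟨o₁, rfl⟩ : ∃ o₁, o = o₁ + 1 := ⟨o - 1, by omega⟩
  rw [List.take_succ_cons, PySem.List.min?_id_cons]
  rw [List.pairwise_cons] at hp
  have hall : ∀ y ∈ od₁.take o₁, y ≤ b := fun y hy => hp.1 y (List.mem_of_mem_take hy)
  have hdesc : (od₁.take o₁).Pairwise (fun a b => b ≤ a) :=
    hp.2.sublist (List.take_sublist o₁ od₁)
  congr 1
  -- foldl min over a descending list ends at its last element
  have key : ∀ (t : List Int) (x : Int), t.Pairwise (fun a b => b ≤ a) → (∀ y ∈ t, y ≤ x) →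
      t.foldl min x = (x :: t).getLast (List.cons_ne_nil x t) := by
    intro t
    induction t with
    | nil => intro x _ _; simp
    | cons y t ih =>
      intro x hpw hall
      rw [List.pairwise_cons] at hpw
      have h1 : min x y = y := min_eq_right (hall y (by simp))
      simp only [List.foldl_cons, h1]
      rw [ih y hpw.2 hpw.1]
      simp [List.getLast_cons]
  rw [key _ _ hdesc hall]
  have hlen : o₁ < od₁.length + 1 := by simpa using h2
  rcases Nat.lt_or_ge o₁ od₁.length with ho | ho
  · have : b :: od₁.take o₁ = (b :: od₁).take (o₁ + 1) := by simp
    rw [List.getLast_eq_getElem]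
    simp only [this]
    rw [List.getElem_take]
    rw [List.getD_eq_getElem _ _ (by simp only [List.length_cons]; omega)]
    congr 1
    have : o₁ ≤ od₁.length := le_of_lt ho
    simp [List.length_take, Nat.min_eq_left this]
  · have ho' : o₁ = od₁.length := by omega
    subst ho'
    rw [List.take_length, List.getLast_eq_getElem]
    rw [List.getD_eq_getElem _ _ (by simp)]
    simp

-- max of a nonempty descending suffix is its first element
theorem max_drop_desc (ev : List Int) (e : Nat) (h : e < ev.length)
    (hp : ev.Pairwise (fun a b => b ≤ a)) :
    PySem.List.max? (ev.drop e) (fun x => x) = some (ev.getD e 0) := by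
  rw [List.drop_eq_getElem_cons h, PySem.List.max?_id_cons]
  have hall : ∀ y ∈ ev.drop (e + 1), y ≤ ev[e] := by
    intro y hy
    obtain ⟨k, hk, rfl⟩ := List.getElem_of_mem hy
    rw [List.getElem_drop]
    have hk' : e + 1 + k < ev.length := by
      have h2 : (ev.drop (e + 1)).length = ev.length - (e + 1) := List.length_drop
      omega
    have := List.pairwise_iff_getElem.mp hp e (e + 1 + k) h hk' (by omega)
    simpa using this
  have key : ∀ (t : List Int) (x : Int), (∀ y ∈ t, y ≤ x) → t.foldl max x = x := by
    intro t
    induction t with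
    | nil => intro x _; simp
    | cons y t ih =>
      intro x hall
      have h1 : max x y = x := max_eq_left (hall y (by simp))
      simp only [List.foldl_cons, h1]
      exact ih x (fun z hz => hall z (by simp [hz]))
  rw [key _ _ hall, List.getD_eq_getElem _ _ h]

-- the full merge of the two sorted parity classes is the descending sort of A
theorem sorted_eq_pmerge (A : List Int) :
    PySem.List.sorted A (fun x => x) true =
      pmerge (PySem.List.sorted (A.filter (fun x => PySem.Int.mod x 2 == 0)) (fun x => x) true)
             (PySem.List.sorted (A.filter (fun x => PySem.Int.mod x 2 == 1)) (fun x => x) true) := by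
  have hevp : (PySem.List.sorted (A.filter (fun x => PySem.Int.mod x 2 == 0)) (fun x => x) true).Pairwise (fun a b => b ≤ a) := by
    simpa using PySem.List.sorted_pairwise_rev (xs := A.filter (fun x => PySem.Int.mod x 2 == 0)) (key := fun x => x)
  have hodp : (PySem.List.sorted (A.filter (fun x => PySem.Int.mod x 2 == 1)) (fun x => x) true).Pairwise (fun a b => b ≤ a) := by
    simpa using PySem.List.sorted_pairwise_rev (xs := A.filter (fun x => PySem.Int.mod x 2 == 1)) (key := fun x => x)
  have hAp : (PySem.List.sorted A (fun x => x) true).Pairwise (fun a b => b ≤ a) := by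
    simpa using PySem.List.sorted_pairwise_rev (xs := A) (key := fun x => x)
  have h1 := PySem.List.sorted_perm (A.filter (fun x => PySem.Int.mod x 2 == 0)) (fun x => x) true
  have h2 := PySem.List.sorted_perm (A.filter (fun x => PySem.Int.mod x 2 == 1)) (fun x => x) true
  have h3 : A.filter (fun x => PySem.Int.mod x 2 == 1) = A.filter (fun x => !(PySem.Int.mod x 2 == 0)) :=
    List.filter_congr (fun x _ => mod2_odd_eq_not_even x)
  have h4 := List.filter_append_perm (fun x => PySem.Int.mod x 2 == 0) A
  have hperm : (PySem.List.sorted A (fun x => x) true).Perm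
      (pmerge (PySem.List.sorted (A.filter (fun x => PySem.Int.mod x 2 == 0)) (fun x => x) true)
              (PySem.List.sorted (A.filter (fun x => PySem.Int.mod x 2 == 1)) (fun x => x) true)) := by
    refine (PySem.List.sorted_perm A (fun x => x) true).trans
      (List.Perm.trans ?_ (pmerge_perm _ _).symm)
    exact ((h1.append h2).trans (by rw [h3]; exact h4)).symm
  exact hperm.eq_of_pairwise (fun a b _ _ hab hba => le_antisymm hba hab) hAp (pmerge_pairwise _ _ hevp hodp)

-- ===== VERDICT (by name: the statement is the Claim_ definition above) =====
theorem solution_spec : Claim_equal_solution := by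
  intro A K _hDom hPre
  have hK0 : (0 : Int) ≤ K := hPre
  simp only [Spec_solution, solution, solution_alt]
  by_cases hK : K > (A.length : Int)
  · rw [if_pos hK, if_pos hK]
  · rw [if_neg hK, if_neg hK]
    set ev := PySem.List.sorted (A.filter (fun x => PySem.Int.mod x 2 == 0)) (fun x => x) true with hev
    set od := PySem.List.sorted (A.filter (fun x => PySem.Int.mod x 2 == 1)) (fun x => x) true with hod
    have hS : PySem.List.sorted A (fun x => x) true = pmerge ev od := sorted_eq_pmerge A
    have hKlen : K.toNat ≤ A.length := by omega
    have hlen : ev.length + od.length = A.length := by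
      have h3 : A.filter (fun x => PySem.Int.mod x 2 == 1) = A.filter (fun x => !(PySem.Int.mod x 2 == 0)) :=
        List.filter_congr (fun x _ => mod2_odd_eq_not_even x)
      have h4 := (List.filter_append_perm (fun x => PySem.Int.mod x 2 == 0) A).length_eq
      rw [List.length_append] at h4
      rw [hev, hod, PySem.List.length_sorted, PySem.List.length_sorted, h3]
      exact h4
    have hall_ev : ∀ x ∈ ev, (PySem.Int.mod x 2 == 0) = true := by
      intro x hx
      rw [hev, PySem.List.mem_sorted] at hx
      exact (List.mem_filter.mp hx).2
    have hall_od : ∀ x ∈ od, (PySem.Int.mod x 2 == 0) = false := by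
      intro x hx
      rw [hod, PySem.List.mem_sorted] at hx
      have := (List.mem_filter.mp hx).2
      rw [mod2_odd_eq_not_even] at this
      simpa using this
    have hevp : ev.Pairwise (fun a b => b ≤ a) := by
      rw [hev]
      exact PySem.List.sorted_pairwise_rev (A.filter (fun x => PySem.Int.mod x 2 == 0)) (fun x => x)
    have hodp : od.Pairwise (fun a b => b ≤ a) := by
      rw [hod]
      exact PySem.List.sorted_pairwise_rev (A.filter (fun x => PySem.Int.mod x 2 == 1)) (fun x => x)
    obtain ⟨hsum, he, ho, hfe, hfo⟩ :=
      mtake_spec (fun x => PySem.Int.mod x 2 == 0) K.toNat ev od hall_ev hall_od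
    set M := mtake K.toNat ev od with hM
    have hmerge : solAltMerge ev od K.toNat (0, 0, 0) = (M.1, M.2.1, M.2.2) := by
      have := solAltMerge_eq_mtake K.toNat ev od 0 0 0 (by omega) (by omega) (by omega)
      simpa using this
    have hsl0 : PySem.List.slice (pmerge ev od) (some 0) (some K) = (pmerge ev od).take K.toNat := by
      rw [PySem.List.slice_zero_start, PySem.List.slice_to _ hK0]
    have hslTo : PySem.List.slice (pmerge ev od) none (some K) = (pmerge ev od).take K.toNat :=
      PySem.List.slice_to _ hK0
    have hslFrom : PySem.List.slice (pmerge ev od) (some K) none = (pmerge ev od).drop K.toNat :=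
      PySem.List.slice_from _ hK0
    rw [hS, hmerge, hsl0, hslTo, hslFrom]
    set T := (pmerge ev od).take K.toNat with hT
    set R := (pmerge ev od).drop K.toNat with hR
    have hToddf : T.filter (fun x => PySem.Int.mod x 2 == 1) = od.take M.2.2 := by
      rw [List.filter_congr (fun x _ => mod2_odd_eq_not_even x)]
      exact hfo
    have hRevenf : R.filter (fun x => PySem.Int.mod x 2 == 0) = ev.drop M.2.1 := by
      have hfull : T.filter (fun x => PySem.Int.mod x 2 == 0) ++ R.filter (fun x => PySem.Int.mod x 2 == 0) = ev := by
        rw [← List.filter_append, hT, hR, List.take_append_drop]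
        exact pmerge_filter_left _ ev od hall_ev hall_od
      rw [hfe] at hfull
      have : ev.take M.2.1 ++ R.filter (fun x => PySem.Int.mod x 2 == 0) = ev.take M.2.1 ++ ev.drop M.2.1 := by
        rw [hfull, List.take_append_drop]
      exact List.append_cancel_left this
    rw [hToddf, hRevenf, ← hsum]
    by_cases hpar : (PySem.Int.mod M.1 2 == 0) = true
    · rw [if_pos hpar, if_pos hpar]
    · rw [if_neg hpar, if_neg hpar]
      have ho1 : 1 ≤ M.2.2 := by
        by_contra hcon
        have h0 : M.2.2 = 0 := by omega
        have hnil : od.take M.2.2 = [] := by rw [h0]; rfl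
        have hnone : ∀ x ∈ T, ¬ (PySem.Int.mod x 2 == 1) := by
          intro x hx hmod
          have : x ∈ T.filter (fun x => PySem.Int.mod x 2 == 1) :=
            List.mem_filter.mpr ⟨hx, hmod⟩
          rw [hToddf, hnil] at this
          exact List.not_mem_nil this
        have := sum_even_of_no_odd T hnone
        rw [← hsum] at this
        exact hpar (by rw [this]; rfl)
      have hmin := min_take_desc od M.2.2 ho1 ho hodp
      by_cases hel : M.2.1 < ev.length
      · have hlpos : 0 < (ev.drop M.2.1).length := by
          rw [List.length_drop]; omega
        rw [if_pos hlpos, if_pos hel]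
        have hmax := max_drop_desc ev M.2.1 hel hevp
        rw [hmin, hmax]
      · have hlz : ¬ 0 < (ev.drop M.2.1).length := by
          rw [List.length_drop]; omega
        rw [if_neg hlz, if_neg hel]
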